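-- pv_equiv track=rewrite | github.com/metaego/coding_test | programmers/개미군단.py | solution
-- ===== SOURCE A (Python) =====
-- def solution(hp):
--     cnt = 0
--     while hp > 0:
--         if hp >= 5:
--             cnt += hp // 5
--             hp = hp % 5
--         elif hp >= 3:
--             cnt += hp // 3
--             hp = hp % 3
--         else:
--             cnt += hp // 1
--             hp = hp % 1
--     return cnt
-- ===== SOURCE B (Python) =====
-- def solution(hp):
--     if hp <= 0:
--         return 0
--     return hp // 5 + hp % 5 // 3 + hp % 5 % 3
-- ===== Notes on version B (the rewrite author's own statement) =====
-- stated objective: simpler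
-- what changed: Replaced the while loop over greedy damage choices with a direct closed-form arithmetic expression (hp//5 + hp%5//3 + hp%5%3) guarded by hp <= 0.
import Mathlib
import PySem

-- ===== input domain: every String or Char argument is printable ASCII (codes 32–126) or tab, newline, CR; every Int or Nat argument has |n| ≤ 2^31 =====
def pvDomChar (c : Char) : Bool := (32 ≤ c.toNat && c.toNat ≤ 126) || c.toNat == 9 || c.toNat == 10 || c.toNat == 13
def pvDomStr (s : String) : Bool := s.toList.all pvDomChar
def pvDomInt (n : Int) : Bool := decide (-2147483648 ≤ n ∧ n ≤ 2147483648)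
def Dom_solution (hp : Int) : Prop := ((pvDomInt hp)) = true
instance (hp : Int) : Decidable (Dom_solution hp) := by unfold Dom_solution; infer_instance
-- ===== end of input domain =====

-- B replaces A's greedy while-loop with a closed-form arithmetic expression (simpler).
-- ===== PORT A =====
-- literal port of A's while loop; state = (hp, cnt), each iteration strictly decreases hp
def solutionLoop (hp cnt : Int) : Int :=
  if _h : hp > 0 then
    if hp ≥ 5 then
      solutionLoop (PySem.Int.mod hp 5) (cnt + PySem.Int.floordiv hp 5)
    else if hp ≥ 3 then
      solutionLoop (PySem.Int.mod hp 3) (cnt + PySem.Int.floordiv hp 3)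
    else
      solutionLoop (PySem.Int.mod hp 1) (cnt + PySem.Int.floordiv hp 1)
  else cnt
termination_by hp.toNat
decreasing_by
  · have := PySem.Int.mod_eq_emod_of_pos (a := hp) (b := 5) (by omega)
    rw [this]; omega
  · have := PySem.Int.mod_eq_emod_of_pos (a := hp) (b := 3) (by omega)
    rw [this]; omega
  · have := PySem.Int.mod_eq_emod_of_pos (a := hp) (b := 1) (by omega)
    rw [this]; omega

def solution (hp : Int) : Int := solutionLoop hp 0

-- ===== PORT B =====
def solution_alt (hp : Int) : Int :=
  if hp ≤ 0 then 0
  else PySem.Int.floordiv hp 5 + PySem.Int.floordiv (PySem.Int.mod hp 5) 3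
       + PySem.Int.mod (PySem.Int.mod hp 5) 3

-- ===== PRECONDITION & SPEC =====
def Spec_solution (hp : Int) (out : Int) : Prop := out = solution_alt hp
instance (hp : Int) (out : Int) : Decidable (Spec_solution hp out) := by unfold Spec_solution; infer_instance

-- ===== CLAIM (what is proved, stated in full; the proofs are below) =====
def Claim_equal_solution : Prop := ∀ (hp : Int), Dom_solution hp → Spec_solution hp (solution hp)

-- ===== LEMMAS AND PROOFS =====

-- loop value for 0 ≤ hp < 5
theorem solutionLoop_small (hp cnt : Int) (h0 : 0 ≤ hp) (h5 : hp < 5) :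
    solutionLoop hp cnt = cnt + PySem.Int.floordiv hp 3 + PySem.Int.mod hp 3 := by
  interval_cases hp <;> simp [solutionLoop, PySem.Int.floordiv, PySem.Int.mod] <;> omega

-- ===== VERDICT (by name: the statement is the Claim_ definition above) =====
theorem solution_spec : Claim_equal_solution := by
  intro hp _
  unfold Spec_solution solution solution_alt
  have e5 : ∀ a : Int, PySem.Int.mod a 5 = a % 5 :=
    fun a => PySem.Int.mod_eq_emod_of_pos (by omega)
  have e3 : ∀ a : Int, PySem.Int.mod a 3 = a % 3 :=
    fun a => PySem.Int.mod_eq_emod_of_pos (by omega)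
  have d5 : ∀ a : Int, PySem.Int.floordiv a 5 = a / 5 :=
    fun a => PySem.Int.floordiv_eq_ediv_of_pos (by omega)
  have d3 : ∀ a : Int, PySem.Int.floordiv a 3 = a / 3 :=
    fun a => PySem.Int.floordiv_eq_ediv_of_pos (by omega)
  by_cases h : hp ≤ 0
  · rw [solutionLoop]; simp [h, not_lt.mpr h]
  · push_neg at h
    by_cases h5 : hp ≥ 5
    · rw [solutionLoop]
      simp only [show hp > 0 by omega, dif_pos, if_pos h5]
      rw [solutionLoop_small _ _ (by rw [e5]; omega) (by rw [e5]; omega)]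
      simp only [e5, e3, d5, d3, if_neg (not_le.mpr h)]
      ring
    · push_neg at h5
      rw [solutionLoop_small _ _ (by omega) h5]
      simp only [e5, e3, d5, d3, if_neg (not_le.mpr h)]
      omega
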